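-- pv_equiv track=rewrite | github.com/fujihiraryo/atcoder-python | src/ABC/ABC161/E1.py | work
-- ===== SOURCE A (Python) =====
-- def work(S, k, c):
--     tir = 0
--     cnt = 0
--     for i, s in enumerate(S):
--         if s == "o" and tir == 0 and cnt < k:
--             yield i
--             tir = c
--             cnt += 1
--         else:
--             tir = max(tir - 1, 0)
-- ===== SOURCE B (Python) =====
-- def work(S, k, c):
--     positions = [i for i, s in enumerate(S) if s == "o"]
--     last = -c - 1
--     cnt = 0
--     for i in positions:
--         if cnt < k and i - last > c:
--             yield i
--             last = i
--             cnt += 1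
-- ===== Notes on version B (the rewrite author's own statement) =====
-- stated objective: faster
-- what changed: B replaces A's single pass with a per-step countdown timer by a collect pass (comprehension of 'o' positions) followed by a greedy selection over that smaller list tracking the last selected index (admit i when i - last > c).
-- outside the precondition, e.g. on work('oo', 2, -1): A returns [0], B returns [0, 1]
import Mathlib
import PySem

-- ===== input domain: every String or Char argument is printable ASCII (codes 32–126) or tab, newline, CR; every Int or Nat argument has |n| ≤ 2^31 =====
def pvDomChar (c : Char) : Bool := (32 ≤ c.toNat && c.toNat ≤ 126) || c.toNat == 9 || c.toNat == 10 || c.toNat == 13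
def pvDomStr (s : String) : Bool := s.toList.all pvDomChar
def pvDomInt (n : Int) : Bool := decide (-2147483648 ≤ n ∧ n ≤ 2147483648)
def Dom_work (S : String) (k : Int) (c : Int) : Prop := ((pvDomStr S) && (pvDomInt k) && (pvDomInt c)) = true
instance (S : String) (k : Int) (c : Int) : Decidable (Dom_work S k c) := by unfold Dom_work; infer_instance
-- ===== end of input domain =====

-- B splits A's single timer-based pass into a collect-positions pass plus a greedy
-- selection over the positions tracking the last chosen index (alternative decomposition).


-- ===== PORT A =====
-- the loop over enumerate(S) with state (tir, cnt), as structural recursion carrying the index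
def workGo (k c : Int) : List Char → Int → Int → Int → List Int
  | [], _, _, _ => []
  | s :: rest, i, tir, cnt =>
    if s = 'o' ∧ tir = 0 ∧ cnt < k then
      i :: workGo k c rest (i + 1) c (cnt + 1)
    else
      workGo k c rest (i + 1) (max (tir - 1) 0) cnt

def work (S : String) (k : Int) (c : Int) : List Int :=
  workGo k c S.toList 0 0 0

-- ===== PORT B =====
-- the comprehension [i for i, s in enumerate(S) if s == "o"]
def posGo : List Char → Int → List Int
  | [], _ => []
  | s :: rest, i => if s = 'o' then i :: posGo rest (i + 1) else posGo rest (i + 1)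

-- the greedy selection loop over positions with state (last, cnt)
def selGo (k c : Int) : List Int → Int → Int → List Int
  | [], _, _ => []
  | i :: rest, last, cnt =>
    if cnt < k ∧ i - last > c then
      i :: selGo k c rest i (cnt + 1)
    else
      selGo k c rest last cnt

def work_alt (S : String) (k : Int) (c : Int) : List Int :=
  selGo k c (posGo S.toList 0) (-c - 1) 0

-- ===== PRECONDITION & SPEC =====
-- Pre_ restricts to the natural domain of nonnegative cooldowns c; for c < 0 (outside the
-- task's natural domain) A's max(tir - 1, 0) accidentally enforces a gap of 2 between picks.
def Pre_work (S : String) (k : Int) (c : Int) : Prop := 0 ≤ c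
instance (S : String) (k : Int) (c : Int) : Decidable (Pre_work S k c) := by unfold Pre_work; infer_instance
def pvWitness_work : String × Int × Int := ("oxoo", 2, 1)

def Spec_work (S : String) (k : Int) (c : Int) (out : List Int) : Prop := out = work_alt S k c
instance (S : String) (k : Int) (c : Int) (out : List Int) : Decidable (Spec_work S k c out) := by unfold Spec_work; infer_instance

-- ===== CLAIM (what is proved, stated in full; the proofs are below) =====
def Claim_equal_work : Prop := ∀ (S : String) (k : Int) (c : Int), Dom_work S k c → Pre_work S k c → Spec_work S k c (work S k c)

-- ===== LEMMAS AND PROOFS =====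
-- Invariant: at index i, A's timer equals max (last + c + 1 - i) 0 for B's last selected index.
theorem workGo_eq_selGo (k c : Int) (hc : 0 ≤ c) :
    ∀ (l : List Char) (i last cnt : Int),
      workGo k c l i (max (last + c + 1 - i) 0) cnt = selGo k c (posGo l i) last cnt := by
  intro l
  induction l with
  | nil => intro i last cnt; simp [workGo, posGo, selGo]
  | cons s rest ih =>
    intro i last cnt
    by_cases hs : s = 'o'
    · by_cases hcnt : cnt < k
      · by_cases hgap : i - last > c
        · have h0 : max (last + c + 1 - i) 0 = 0 := by omega
          rw [workGo, posGo, if_pos hs, h0, selGo, if_pos ⟨hs, rfl, hcnt⟩, if_pos ⟨hcnt, hgap⟩]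
          have hc' : c = max (i + c + 1 - (i + 1)) 0 := by omega
          rw [show workGo k c rest (i+1) c (cnt+1)
                = workGo k c rest (i+1) (max (i + c + 1 - (i+1)) 0) (cnt+1) from by rw [← hc']]
          exact congrArg (i :: ·) (ih (i + 1) i (cnt + 1))
        · have h0 : max (last + c + 1 - i) 0 ≠ 0 := by omega
          rw [workGo, posGo, if_pos hs, selGo,
              if_neg (by rintro ⟨_, h, _⟩; exact h0 h), if_neg (by rintro ⟨_, h⟩; exact hgap h)]
          have : max (max (last + c + 1 - i) 0 - 1) 0 = max (last + c + 1 - (i + 1)) 0 := by omega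
          rw [this]; exact ih (i + 1) last cnt
      · rw [workGo, posGo, if_pos hs, selGo,
            if_neg (by rintro ⟨_, _, h⟩; exact hcnt h), if_neg (by rintro ⟨h, _⟩; exact hcnt h)]
        have : max (max (last + c + 1 - i) 0 - 1) 0 = max (last + c + 1 - (i + 1)) 0 := by omega
        rw [this]; exact ih (i + 1) last cnt
    · rw [workGo, posGo, if_neg (by rintro ⟨h, _⟩; exact hs h), if_neg hs]
      have : max (max (last + c + 1 - i) 0 - 1) 0 = max (last + c + 1 - (i + 1)) 0 := by
        omega
      rw [this]; exact ih (i + 1) last cnt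

-- ===== VERDICT (by name: the statement is the Claim_ definition above) =====
theorem work_spec : Claim_equal_work := by
  intro S k c _ hc
  unfold Spec_work work work_alt
  have h := workGo_eq_selGo k c hc S.toList 0 (-c - 1) 0
  have h0 : max ((-c - 1) + c + 1 - 0) 0 = (0 : Int) := by omega
  rw [h0] at h
  exact h
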